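-- pv_equiv track=rewrite | github.com/Yossefmohammed/daleel-ai | tests/test_core.py | expand_skills
-- ===== SOURCE A (Python) =====
-- _SKILL_ALIASES = {
--     "javascript": ["js", "node.js", "nodejs", "ecmascript"],
--     "python": ["py"],
--     "machine learning": ["ml", "deep learning", "ai"],
-- }
--
-- def expand_skills(skills: list) -> list:
--     expanded = set(s.lower() for s in skills)
--     for skill in skills:
--         canonical = skill.lower().strip()
--         for canon, aliases in _SKILL_ALIASES.items():
--             if canonical in [a.lower() for a in aliases] or canonical == canon:
--                 expanded.update(a.lower() for a in aliases)
--                 expanded.add(canon)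
--     return list(expanded)
-- ===== SOURCE B (Python) =====
-- _SKILL_ALIASES = {
--     "javascript": ["js", "node.js", "nodejs", "ecmascript"],
--     "python": ["py"],
--     "machine learning": ["ml", "deep learning", "ai"],
-- }
--
-- # one-time reverse index: every lowered alias and the canon itself map to the
-- # full expansion group (lowered aliases followed by the canon)
-- _ALIAS_INDEX = {}
-- for _canon, _aliases in _SKILL_ALIASES.items():
--     _group = [_a.lower() for _a in _aliases] + [_canon]
--     for _key in _group:
--         _ALIAS_INDEX[_key] = _group
--
-- def expand_skills(skills: list) -> list:
--     expanded = set(s.lower() for s in skills)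
--     for skill in skills:
--         group = _ALIAS_INDEX.get(skill.lower().strip())
--         if group is not None:
--             expanded.update(group)
--     return list(expanded)
-- ===== Notes on version B (the rewrite author's own statement) =====
-- stated objective: faster
-- what changed: B precomputes once a reverse-lookup dict mapping every lowered alias and every canon to its full expansion group, so the per-skill inner scan over all alias groups (rebuilding the lowered alias lists each time) becomes a single dict lookup.
import Mathlib
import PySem

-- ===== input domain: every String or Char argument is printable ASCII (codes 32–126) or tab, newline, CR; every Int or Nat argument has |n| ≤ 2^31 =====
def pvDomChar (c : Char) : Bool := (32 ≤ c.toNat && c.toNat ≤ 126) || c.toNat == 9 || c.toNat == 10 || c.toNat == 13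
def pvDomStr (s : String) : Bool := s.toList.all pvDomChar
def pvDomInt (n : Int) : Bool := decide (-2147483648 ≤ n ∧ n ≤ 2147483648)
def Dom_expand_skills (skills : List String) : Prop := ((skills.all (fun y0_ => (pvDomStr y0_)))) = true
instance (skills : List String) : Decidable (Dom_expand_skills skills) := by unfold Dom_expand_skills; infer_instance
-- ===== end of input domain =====

-- B replaces A's per-skill scan over all alias groups with a prebuilt reverse-lookup
-- dict (key → expansion group), i.e. one indexed lookup per skill (objective: simpler).

-- ===== PORT A =====
def skillAliases : List (String × List String) :=
  [("javascript", ["js", "node.js", "nodejs", "ecmascript"]),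
   ("python", ["py"]),
   ("machine learning", ["ml", "deep learning", "ai"])]

-- body of A's outer loop (one skill)
def scanStep (expanded : PySem.Set String) (skill : String) : PySem.Set String :=
  let canonical := PySem.Str.strip (PySem.Str.lower skill)
  skillAliases.foldl (fun expanded ca =>
    if (ca.2.map PySem.Str.lower).contains canonical || canonical == ca.1 then
      PySem.Set.add (PySem.Set.update expanded (ca.2.map PySem.Str.lower)) ca.1
    else expanded) expanded

def expand_skills (skills : List String) : List String :=
  skills.foldl scanStep (PySem.Set.ofList (skills.map PySem.Str.lower))

-- ===== PORT B =====
-- module-level constant of Source B: reverse index built once by a pre-pass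
def aliasIndex : PySem.Dict String (List String) :=
  skillAliases.foldl (fun d ca =>
    let group := ca.2.map PySem.Str.lower ++ [ca.1]
    group.foldl (fun d key => d.insert key group) d) PySem.Dict.empty

-- body of B's loop (one skill): a single indexed lookup
def lookupStep (expanded : PySem.Set String) (skill : String) : PySem.Set String :=
  match aliasIndex.get? (PySem.Str.strip (PySem.Str.lower skill)) with
  | some group => PySem.Set.update expanded group
  | none => expanded

def expand_skills_alt (skills : List String) : List String :=
  skills.foldl lookupStep (PySem.Set.ofList (skills.map PySem.Str.lower))

-- ===== PRECONDITION & SPEC =====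
def Spec_expand_skills (skills : List String) (out : List String) : Prop := out = expand_skills_alt skills
instance (skills : List String) (out : List String) : Decidable (Spec_expand_skills skills out) := by unfold Spec_expand_skills; infer_instance

-- ===== CLAIM (what is proved, stated in full; the proofs are below) =====
def Claim_equal_expand_skills : Prop := ∀ (skills : List String), Dom_expand_skills skills → Spec_expand_skills skills (expand_skills skills)

-- ===== LEMMAS AND PROOFS =====

-- per-skill step of A equals per-skill step of B, for any accumulator and key
set_option maxRecDepth 4096 in
set_option maxHeartbeats 1000000 in
theorem key_eq (e : PySem.Set String) (c : String) :
    (skillAliases.foldl (fun expanded ca =>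
      if (ca.2.map PySem.Str.lower).contains c || c == ca.1 then
        PySem.Set.add (PySem.Set.update expanded (ca.2.map PySem.Str.lower)) ca.1
      else expanded) e)
    = (match aliasIndex.get? c with
       | some group => PySem.Set.update e group
       | none => e) := by
  rcases eq_or_ne c "js" with h | h1; · subst h; rfl
  rcases eq_or_ne c "node.js" with h | h2; · subst h; rfl
  rcases eq_or_ne c "nodejs" with h | h3; · subst h; rfl
  rcases eq_or_ne c "ecmascript" with h | h4; · subst h; rfl
  rcases eq_or_ne c "javascript" with h | h5; · subst h; rfl
  rcases eq_or_ne c "py" with h | h6; · subst h; rfl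
  rcases eq_or_ne c "python" with h | h7; · subst h; rfl
  rcases eq_or_ne c "ml" with h | h8; · subst h; rfl
  rcases eq_or_ne c "deep learning" with h | h9; · subst h; rfl
  rcases eq_or_ne c "ai" with h | h10; · subst h; rfl
  rcases eq_or_ne c "machine learning" with h | h11; · subst h; rfl
  have hget : aliasIndex.get? c = none := by
    rw [PySem.Dict.get?_eq_none_iff_not_mem_keys]
    have hk : aliasIndex.keys = ["js", "node.js", "nodejs", "ecmascript", "javascript",
        "py", "python", "ml", "deep learning", "ai", "machine learning"] := by decide
    rw [hk]
    simp [h1, h2, h3, h4, h5, h6, h7, h8, h9, h10, h11]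
  rw [hget]
  have l1 : PySem.Str.lower "js" = "js" := by decide
  have l2 : PySem.Str.lower "node.js" = "node.js" := by decide
  have l3 : PySem.Str.lower "nodejs" = "nodejs" := by decide
  have l4 : PySem.Str.lower "ecmascript" = "ecmascript" := by decide
  have l5 : PySem.Str.lower "py" = "py" := by decide
  have l6 : PySem.Str.lower "ml" = "ml" := by decide
  have l7 : PySem.Str.lower "deep learning" = "deep learning" := by decide
  have l8 : PySem.Str.lower "ai" = "ai" := by decide
  simp [skillAliases, l1, l2, l3, l4, l5, l6, l7, l8,
        Ne.symm h1, Ne.symm h2, Ne.symm h3, Ne.symm h4, Ne.symm h6,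
        Ne.symm h8, Ne.symm h9, Ne.symm h10, h5, h7, h11]

theorem step_eq (e : PySem.Set String) (s : String) : scanStep e s = lookupStep e s := by
  unfold scanStep lookupStep
  exact key_eq e (PySem.Str.strip (PySem.Str.lower s))

theorem fold_eq (skills : List String) : ∀ e : PySem.Set String,
    skills.foldl scanStep e = skills.foldl lookupStep e := by
  induction skills with
  | nil => intro e; simp only [List.foldl_nil]
  | cons s rest ih =>
    intro e
    rw [List.foldl_cons, List.foldl_cons, step_eq]
    exact ih _

-- ===== VERDICT (by name: the statement is the Claim_ definition above) =====
theorem expand_skills_spec : Claim_equal_expand_skills := by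
  intro skills _
  show expand_skills skills = expand_skills_alt skills
  unfold expand_skills expand_skills_alt
  exact fold_eq skills _
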